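-- pv_equiv track=rewrite | github.com/dohtur03/Py_1 | task3.py | find_figures
-- ===== SOURCE A (Python) =====
-- def dfs(matrix, visited, r, c, bounds, count):
--     rows = len(matrix)
--     cols = len(matrix[0])
--     if r < 0 or r >= rows or c < 0 or c >= cols:
--         return
--     if visited[r][c] or matrix[r][c] == 0:
--         return
--     visited[r][c] = True
--     count[0] += 1
--     # Update bounds: min_r, max_r, min_c, max_c
--     if r < bounds[0]: bounds[0] = r
--     if r > bounds[1]: bounds[1] = r
--     if c < bounds[2]: bounds[2] = c
--     if c > bounds[3]: bounds[3] = c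
--     # Visit neighbors (no diagonals)
--     dfs(matrix, visited, r-1, c, bounds, count)
--     dfs(matrix, visited, r+1, c, bounds, count)
--     dfs(matrix, visited, r, c-1, bounds, count)
--     dfs(matrix, visited, r, c+1, bounds, count)
--
-- def analyze_figure(bounds, count):
--     height = bounds[1] - bounds[0] + 1
--     width = bounds[3] - bounds[2] + 1
--     area = height * width
--     if area == count:
--         # Perfect rectangle, call it square as per the problem
--         return 'square'
--     else:
--         # Otherwise, circle
--         return 'circle'
--
-- def find_figures(matrix):
--     if len(matrix) == 0 or len(matrix[0]) == 0:
--         return 0, 0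
--     rows = len(matrix)
--     cols = len(matrix[0])
--     visited = [[False]*cols for _ in range(rows)]
--     squares = 0
--     circles = 0
--     for r in range(rows):
--         for c in range(cols):
--             if matrix[r][c] == 1 and not visited[r][c]:
--                 bounds = [r, r, c, c]  # min_r, max_r, min_c, max_c
--                 count = [0]  # using list to pass by reference
--                 dfs(matrix, visited, r, c, bounds, count)
--                 # ignore one-unit figures (problem says more than one unit)
--                 if count[0] <= 1:
--                     continue
--                 kind = analyze_figure(bounds, count[0])
--                 if kind == 'square':
--                     squares += 1
--                 else:
--                     circles += 1
--     return squares, circles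
-- ===== SOURCE B (Python) =====
-- def find_figures(matrix):
--     if len(matrix) == 0 or len(matrix[0]) == 0:
--         return 0, 0
--     rows, cols = len(matrix), len(matrix[0])
--     visited = [[False] * cols for _ in range(rows)]
--     squares = 0
--     circles = 0
--     for r in range(rows):
--         for c in range(cols):
--             if matrix[r][c] == 1 and not visited[r][c]:
--                 min_r = max_r = r
--                 min_c = max_c = c
--                 count = 0
--                 stack = [(r, c)]
--                 while stack:
--                     i, j = stack.pop()
--                     if i < 0 or i >= rows or j < 0 or j >= cols:
--                         continue
--                     if visited[i][j] or matrix[i][j] == 0: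
--                         continue
--                     visited[i][j] = True
--                     count += 1
--                     if i < min_r: min_r = i
--                     if i > max_r: max_r = i
--                     if j < min_c: min_c = j
--                     if j > max_c: max_c = j
--                     stack.extend(((i, j + 1), (i, j - 1), (i + 1, j), (i - 1, j)))
--                 if count <= 1:
--                     continue
--                 if (max_r - min_r + 1) * (max_c - min_c + 1) == count:
--                     squares += 1
--                 else:
--                     circles += 1
--     return squares, circles
-- ===== Notes on version B (the rewrite author's own statement) =====
-- stated objective: alternative
-- what changed: The recursive dfs helper (state threaded through four self-calls per cell) is replaced by an iterative flood fill with an explicit stack inside find_figures, updating count and the bounding box inline; same double scan and square/circle test, and no Python call-stack recursion overhead or recursion limit.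
import Mathlib
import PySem

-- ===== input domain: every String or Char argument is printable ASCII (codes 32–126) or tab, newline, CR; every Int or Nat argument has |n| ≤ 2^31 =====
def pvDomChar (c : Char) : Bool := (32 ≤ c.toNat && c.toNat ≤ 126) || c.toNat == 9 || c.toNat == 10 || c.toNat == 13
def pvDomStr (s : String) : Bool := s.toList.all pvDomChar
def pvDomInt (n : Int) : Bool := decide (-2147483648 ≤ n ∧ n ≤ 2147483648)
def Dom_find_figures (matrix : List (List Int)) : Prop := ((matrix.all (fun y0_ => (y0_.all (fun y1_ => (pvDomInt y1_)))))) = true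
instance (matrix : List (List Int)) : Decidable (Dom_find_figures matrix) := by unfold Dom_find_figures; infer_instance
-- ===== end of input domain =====

-- B replaces A's recursive dfs helper by an iterative explicit-stack flood fill inside
-- find_figures (same double scan, same square/circle test); equivalence is about the
-- return value (the Python A mutates its local visited only). Same asymptotic cost.

-- shared cell accessors (both Pythons index matrix/visited identically)
-- matrix[r][c]: used only under 0 ≤ r < rows, 0 ≤ c < cols; under Pre_ the defaults are unreachable
def pvGetCell (m : List (List Int)) (r c : Int) : Int :=
  (m.getD r.toNat []).getD c.toNat 0

-- visited[r][c]: visited always has shape rows × cols in Python, so the out-of-shape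
-- default (true) is unreachable there; it only makes the Lean functions total
def pvGetVis (v : List (List Bool)) (r c : Int) : Bool :=
  ((v[r.toNat]?.bind (fun row => row[c.toNat]?)).getD true)

-- visited[r][c] = True (indices in range in Python)
def pvSetVis (v : List (List Bool)) (r c : Int) : List (List Bool) :=
  v.set r.toNat ((v.getD r.toNat []).set c.toNat true)

-- shared state: (visited, (min_r, max_r, min_c, max_c), count)
abbrev PvSt := List (List Bool) × (Int × Int × Int × Int) × Int

-- number of False entries of visited (termination measure for B's while loop)
def pvMu (v : List (List Bool)) : Nat := (v.map (fun row => row.count false)).sum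

theorem pv_count_set_lt (row : List Bool) : ∀ j : Nat, row[j]? = some false →
    (row.set j true).count false < row.count false := by
  induction row with
  | nil => intro j h; simp at h
  | cons a t ih =>
    intro j h
    cases j with
    | zero =>
      simp at h; subst h
      simp
    | succ j =>
      simp at h
      have := ih j h
      simp [List.count_cons]
      omega

theorem pvMu_setVis_lt (v : List (List Bool)) : ∀ (i : Nat) (j : Nat) (row : List Bool),
    v[i]? = some row → row[j]? = some false →
    pvMu (v.set i ((v.getD i []).set j true)) < pvMu v := by
  induction v with
  | nil => intro i j row h; simp at h
  | cons a t ih =>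
    intro i j row h hj
    cases i with
    | zero =>
      simp at h; subst h
      simp [pvMu, List.getD]
      exact pv_count_set_lt _ j hj
    | succ i =>
      simp at h
      have := ih i j row h hj
      simp [pvMu, List.getD] at *
      omega

-- pvGetVis = false yields the structural facts the measure needs
theorem pvGetVis_false {v : List (List Bool)} {r c : Int} (h : pvGetVis v r c = false) :
    ∃ row, v[r.toNat]? = some row ∧ row[c.toNat]? = some false := by
  unfold pvGetVis at h
  cases hv : v[r.toNat]? with
  | none => rw [hv] at h; simp at h
  | some row =>
    rw [hv] at h
    cases hc : row[c.toNat]? with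
    | none => simp [hc] at h
    | some b =>
      cases b
      · exact ⟨row, rfl, hc⟩
      · simp [hc] at h

theorem pvMu_setVis_lt' {v : List (List Bool)} {r c : Int} (h : pvGetVis v r c = false) :
    pvMu (pvSetVis v r c) < pvMu v := by
  obtain ⟨row, hv, hc⟩ := pvGetVis_false h
  exact pvMu_setVis_lt v r.toNat c.toNat row hv hc

-- ===== PORT A =====
-- dfs(matrix, visited, r, c, bounds, count): state (visited, bounds, count) is threaded
-- (Python mutates it in place).  The Nat argument is a fuel/totality guard only: the
-- call in find_figures passes rows*cols+1 and the proofs below show any fuel > pvMu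
-- visited computes the Python value, so the guard branch is never the result.
def dfs (matrix : List (List Int)) : Nat → PvSt → Int → Int → PvSt
  | 0, s, _, _ => s
  | n+1, (v, (b0, b1, b2, b3), cnt), r, c =>
    let rows : Int := matrix.length
    let cols : Int := (matrix.headD []).length
    if r < 0 || rows ≤ r || c < 0 || cols ≤ c then (v, (b0, b1, b2, b3), cnt)
    else if pvGetVis v r c || (pvGetCell matrix r c == 0) then (v, (b0, b1, b2, b3), cnt)
    else
      let v' := pvSetVis v r c
      let cnt' := cnt + 1
      let b0' := if r < b0 then r else b0
      let b1' := if r > b1 then r else b1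
      let b2' := if c < b2 then c else b2
      let b3' := if c > b3 then c else b3
      let s1 := dfs matrix n (v', (b0', b1', b2', b3'), cnt') (r-1) c
      let s2 := dfs matrix n s1 (r+1) c
      let s3 := dfs matrix n s2 r (c-1)
      dfs matrix n s3 r (c+1)

def analyze_figure (bounds : Int × Int × Int × Int) (count : Int) : String :=
  let height := bounds.2.1 - bounds.1 + 1
  let width := bounds.2.2.2 - bounds.2.2.1 + 1
  let area := height * width
  if area == count then "square" else "circle"

-- body of A's inner 'for c in range(cols)' loop (acc = (visited, squares, circles))
def find_figures_step (matrix : List (List Int)) (fuel : Nat) (r : Int)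
    (acc : List (List Bool) × Int × Int) (c : Int) : List (List Bool) × Int × Int :=
  if (pvGetCell matrix r c == 1) && !(pvGetVis acc.1 r c) then
    let s := dfs matrix fuel (acc.1, (r, r, c, c), 0) r c
    if s.2.2 ≤ 1 then (s.1, acc.2.1, acc.2.2)
    else if analyze_figure s.2.1 s.2.2 == "square" then (s.1, acc.2.1 + 1, acc.2.2)
    else (s.1, acc.2.1, acc.2.2 + 1)
  else acc

def find_figures (matrix : List (List Int)) : Int × Int :=
  if matrix.length == 0 || (matrix.headD []).length == 0 then (0, 0)
  else
    let rows : Int := matrix.length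
    let cols : Int := (matrix.headD []).length
    let visited := List.replicate matrix.length (List.replicate (matrix.headD []).length false)
    let fuel := matrix.length * (matrix.headD []).length + 1
    let res := (PySem.List.pyRange 0 rows 1).foldl
      (fun acc r => (PySem.List.pyRange 0 cols 1).foldl (find_figures_step matrix fuel r) acc)
      (visited, 0, 0)
    (res.2.1, res.2.2)

-- ===== PORT B =====
-- B's 'while stack' loop: the Lean list head is the Python list END (the stack top),
-- so stack.extend(((i,j+1),(i,j-1),(i+1,j),(i-1,j))) followed by pop() yields the
-- head order (i-1,j), (i+1,j), (i,j-1), (i,j+1) below.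
def flood (matrix : List (List Int)) : PvSt → List (Int × Int) → PvSt
  | s, [] => s
  | (v, (b0, b1, b2, b3), cnt), (i, j) :: stack =>
    let rows : Int := matrix.length
    let cols : Int := (matrix.headD []).length
    if i < 0 || rows ≤ i || j < 0 || cols ≤ j then
      flood matrix (v, (b0, b1, b2, b3), cnt) stack
    else if pvGetVis v i j || (pvGetCell matrix i j == 0) then
      flood matrix (v, (b0, b1, b2, b3), cnt) stack
    else
      flood matrix (pvSetVis v i j,
        ((if i < b0 then i else b0), (if i > b1 then i else b1),
         (if j < b2 then j else b2), (if j > b3 then j else b3)),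
        cnt + 1) ((i-1, j) :: (i+1, j) :: (i, j-1) :: (i, j+1) :: stack)
  termination_by s stack => (pvMu s.1, stack.length)
  decreasing_by
  · exact Prod.Lex.right _ (by simp)
  · exact Prod.Lex.right _ (by simp)
  · exact Prod.Lex.left _ _ (pvMu_setVis_lt' (by
      rename_i _ h2
      simp at h2
      exact h2.1))

-- body of B's inner 'for c in range(cols)' loop
def find_figures_alt_step (matrix : List (List Int)) (r : Int)
    (acc : List (List Bool) × Int × Int) (c : Int) : List (List Bool) × Int × Int :=
  if (pvGetCell matrix r c == 1) && !(pvGetVis acc.1 r c) then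
    let s := flood matrix (acc.1, (r, r, c, c), 0) [(r, c)]
    if s.2.2 ≤ 1 then (s.1, acc.2.1, acc.2.2)
    else if (s.2.1.2.1 - s.2.1.1 + 1) * (s.2.1.2.2.2 - s.2.1.2.2.1 + 1) == s.2.2 then
      (s.1, acc.2.1 + 1, acc.2.2)
    else (s.1, acc.2.1, acc.2.2 + 1)
  else acc

def find_figures_alt (matrix : List (List Int)) : Int × Int :=
  if matrix.length == 0 || (matrix.headD []).length == 0 then (0, 0)
  else
    let rows : Int := matrix.length
    let cols : Int := (matrix.headD []).length
    let visited := List.replicate matrix.length (List.replicate (matrix.headD []).length false)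
    let res := (PySem.List.pyRange 0 rows 1).foldl
      (fun acc r => (PySem.List.pyRange 0 cols 1).foldl (find_figures_alt_step matrix r) acc)
      (visited, 0, 0)
    (res.2.1, res.2.2)

-- ===== PRECONDITION & SPEC =====
-- Pre_ excludes exactly the matrices with some row shorter than row 0: there the Python A
-- (and the Python B) raises IndexError at matrix[r][c]; on every other input A returns.
def Pre_find_figures (matrix : List (List Int)) : Prop :=
  ∀ row ∈ matrix, (matrix.headD []).length ≤ row.length
instance (matrix : List (List Int)) : Decidable (Pre_find_figures matrix) := by
  unfold Pre_find_figures; infer_instance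

def pvWitness_find_figures : List (List Int) := [[1, 1, 0], [1, 1, 0], [0, 0, 1]]

def Spec_find_figures (matrix : List (List Int)) (out : Int × Int) : Prop := out = find_figures_alt matrix
instance (matrix : List (List Int)) (out : Int × Int) : Decidable (Spec_find_figures matrix out) := by unfold Spec_find_figures; infer_instance

-- ===== CLAIM (what is proved, stated in full; the proofs are below) =====
def Claim_equal_find_figures : Prop := ∀ (matrix : List (List Int)), Dom_find_figures matrix → Pre_find_figures matrix → Spec_find_figures matrix (find_figures matrix)

-- ===== LEMMAS AND PROOFS =====

theorem pv_count_set_le (row : List Bool) : ∀ j : Nat,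
    (row.set j true).count false ≤ row.count false := by
  induction row with
  | nil => intro j; simp
  | cons a t ih =>
    intro j
    cases j with
    | zero => simp [List.count_cons]
    | succ j => have := ih j; simp [List.count_cons]; omega

theorem pvMu_setVis_le (v : List (List Bool)) : ∀ (i j : Nat),
    pvMu (v.set i ((v.getD i []).set j true)) ≤ pvMu v := by
  induction v with
  | nil => intro i j; simp [pvMu]
  | cons a t ih =>
    intro i j
    cases i with
    | zero =>
      simp [pvMu, List.getD]
      have := pv_count_set_le a j
      omega
    | succ i =>
      have := ih i j
      simp [pvMu, List.getD] at *
      omega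

theorem dfs_mu_le (m : List (List Int)) : ∀ (n : Nat) (s : PvSt) (r c : Int),
    pvMu (dfs m n s r c).1 ≤ pvMu s.1 := by
  intro n
  induction n with
  | zero => intro s r c; rw [dfs]
  | succ n ih =>
    rintro ⟨v, ⟨b0, b1, b2, b3⟩, cnt⟩ r c
    rw [dfs]
    split
    · exact le_refl _
    · split
      · exact le_refl _
      · refine le_trans (ih _ r (c+1)) (le_trans (ih _ r (c-1)) (le_trans (ih _ (r+1) c)
          (le_trans (ih _ (r-1) c) ?_)))
        exact pvMu_setVis_le v r.toNat c.toNat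

-- the stack machine simulates the recursion exactly
theorem dfs_flood (m : List (List Int)) : ∀ (n : Nat) (v : List (List Bool))
    (b : Int × Int × Int × Int) (cnt : Int) (r c : Int) (stack : List (Int × Int)),
    pvMu v < n →
    flood m (dfs m n (v, b, cnt) r c) stack = flood m (v, b, cnt) ((r, c) :: stack) := by
  intro n
  induction n with
  | zero => intro v b cnt r c stack h; omega
  | succ n ih =>
    rintro v ⟨b0, b1, b2, b3⟩ cnt r c stack h
    rw [dfs, flood]
    split
    · rfl
    · split
      · rfl
      · rename_i hbound hvis
        simp only []
        -- mark step
        have hvisf : pvGetVis v r c = false := by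
          simp at hvis; exact hvis.1
        have hlt : pvMu (pvSetVis v r c) < pvMu v := pvMu_setVis_lt' hvisf
        set v' := pvSetVis v r c with hv'
        set B' : Int × Int × Int × Int :=
          ((if r < b0 then r else b0), (if r > b1 then r else b1),
           (if c < b2 then c else b2), (if c > b3 then c else b3)) with hB'
        rcases h2 : dfs m n (v', B', cnt + 1) (r-1) c with ⟨v2, B2, k2⟩
        have hm2 : pvMu v2 ≤ pvMu v' := by
          have := dfs_mu_le m n (v', B', cnt + 1) (r-1) c; rw [h2] at this; exact this
        rcases h3 : dfs m n (v2, B2, k2) (r+1) c with ⟨v3, B3, k3⟩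
        have hm3 : pvMu v3 ≤ pvMu v2 := by
          have := dfs_mu_le m n (v2, B2, k2) (r+1) c; rw [h3] at this; exact this
        rcases h4 : dfs m n (v3, B3, k3) r (c-1) with ⟨v4, B4, k4⟩
        have hm4 : pvMu v4 ≤ pvMu v3 := by
          have := dfs_mu_le m n (v3, B3, k3) r (c-1); rw [h4] at this; exact this
        rw [ih v4 B4 k4 r (c+1) stack (by omega)]
        rw [← h4, ih v3 B3 k3 r (c-1) _ (by omega)]
        rw [← h3, ih v2 B2 k2 (r+1) c _ (by omega)]
        rw [← h2, ih v' B' (cnt+1) (r-1) c _ (by omega)]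

-- a generic foldl congruence under an invariant
theorem pv_foldl_congr {α : Type} (P : α → Prop) (f g : α → Int → α)
    (hfg : ∀ a c, P a → f a c = g a c) (hP : ∀ a c, P a → P (f a c)) :
    ∀ (cs : List Int) (a : α), P a → cs.foldl f a = cs.foldl g a ∧ P (cs.foldl f a) := by
  intro cs
  induction cs with
  | nil => intro a h; exact ⟨rfl, h⟩
  | cons c cs ih =>
    intro a h
    have he := hfg a c h
    have hp := hP a c h
    obtain ⟨h1, h2⟩ := ih (f a c) hp
    refine ⟨?_, h2⟩
    rw [List.foldl_cons, List.foldl_cons, ← he]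
    exact h1

theorem flood_nil (m : List (List Int)) (s : PvSt) : flood m s [] = s := by
  rw [flood]

theorem step_eq (m : List (List Int)) (fuel : Nat) (r : Int)
    (acc : List (List Bool) × Int × Int) (c : Int) (h : pvMu acc.1 < fuel) :
    find_figures_step m fuel r acc c = find_figures_alt_step m r acc c := by
  obtain ⟨v, sq, ci⟩ := acc
  unfold find_figures_step find_figures_alt_step
  simp only []
  split
  · have key := dfs_flood m fuel v (r, r, c, c) 0 r c [] h
    rw [flood_nil] at key
    rw [key]
    rcases flood m (v, (r, r, c, c), 0) [(r, c)] with ⟨v', ⟨e0, e1, e2, e3⟩, k⟩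
    simp only [analyze_figure]
    split
    · rfl
    · split <;> simp_all
  · rfl

theorem step_mu (m : List (List Int)) (fuel : Nat) (r : Int)
    (acc : List (List Bool) × Int × Int) (c : Int) :
    pvMu (find_figures_step m fuel r acc c).1 ≤ pvMu acc.1 := by
  obtain ⟨v, sq, ci⟩ := acc
  unfold find_figures_step
  simp only []
  split
  · have := dfs_mu_le m fuel (v, (r, r, c, c), 0) r c
    split
    · exact this
    · split <;> exact this
  · exact le_refl _

theorem pvMu_replicate (R C : Nat) :
    pvMu (List.replicate R (List.replicate C false)) = R * C := by
  simp [pvMu, List.sum_replicate, smul_eq_mul]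

-- ===== VERDICT (by name: the statement is the Claim_ definition above) =====
theorem find_figures_spec : Claim_equal_find_figures := by
  intro matrix _ _
  unfold Spec_find_figures find_figures find_figures_alt
  split
  · rfl
  · simp only []
    set R := matrix.length
    set C := (matrix.headD []).length
    set fuel := R * C + 1 with hfuel
    have hmain := pv_foldl_congr (α := List (List Bool) × Int × Int)
      (fun a => pvMu a.1 ≤ R * C)
      (fun acc r => (PySem.List.pyRange 0 (C : Int) 1).foldl (find_figures_step matrix fuel r) acc)
      (fun acc r => (PySem.List.pyRange 0 (C : Int) 1).foldl (find_figures_alt_step matrix r) acc)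
      (fun a r ha => (pv_foldl_congr (fun a => pvMu a.1 ≤ R * C)
          (find_figures_step matrix fuel r) (find_figures_alt_step matrix r)
          (fun a c ha => step_eq matrix fuel r a c (by omega))
          (fun a c ha => le_trans (step_mu matrix fuel r a c) ha)
          _ a ha).1)
      (fun a r ha => (pv_foldl_congr (fun a => pvMu a.1 ≤ R * C)
          (find_figures_step matrix fuel r) (find_figures_alt_step matrix r)
          (fun a c ha => step_eq matrix fuel r a c (by omega))
          (fun a c ha => le_trans (step_mu matrix fuel r a c) ha)
          _ a ha).2)
      (PySem.List.pyRange 0 (R : Int) 1)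
      (List.replicate R (List.replicate C false), 0, 0)
      (by simp [pvMu_replicate])
    rw [hmain.1]
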